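-- pv_equiv track=rewrite | github.com/appleeatsapples-lang/SIRR | Engine/modules/bazi_pillars.py | _get_bazi_month
-- ===== SOURCE A (Python) =====
-- MONTH_BOUNDARIES = [
--     (2, 4),   # Month 1 starts ~Feb 4 (Lichun)
--     (3, 6),   # Month 2 starts ~Mar 6
--     (4, 5),   # Month 3 starts ~Apr 5
--     (5, 6),   # Month 4 starts ~May 6
--     (6, 6),   # Month 5 starts ~Jun 6
--     (7, 7),   # Month 6 starts ~Jul 7
--     (8, 7),   # Month 7 starts ~Aug 7
--     (9, 8),   # Month 8 starts ~Sep 8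
--     (10, 8),  # Month 9 starts ~Oct 8
--     (11, 7),  # Month 10 starts ~Nov 7
--     (12, 7),  # Month 11 starts ~Dec 7
--     (1, 6),   # Month 12 starts ~Jan 6
-- ]
--
-- def _get_bazi_month(cal_month: int, cal_day: int) -> int:
--     """Get BaZi month number (1-12) from calendar date."""
--     for i, (bm, bd) in enumerate(MONTH_BOUNDARIES):
--         next_i = (i + 1) % 12
--         next_bm, next_bd = MONTH_BOUNDARIES[next_i]
--         if bm == cal_month and cal_day >= bd:
--             return (i % 12) + 1
--         if bm == cal_month and cal_day < bd:
--             return ((i - 1) % 12) + 1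
--     return 1
-- ===== SOURCE B (Python) =====
-- # Counting algorithm: instead of locating the matching table entry and early-returning,
-- # count how many solar-term boundaries the date has already passed within the BaZi year
-- # (which starts in February) and derive the month number from that count.
-- MONTH_BOUNDARIES = [
--     (2, 4), (3, 6), (4, 5), (5, 6), (6, 6), (7, 7),
--     (8, 7), (9, 8), (10, 8), (11, 7), (12, 7), (1, 6),
-- ]
--
-- def _get_bazi_month(cal_month: int, cal_day: int) -> int:
--     if cal_month < 1 or cal_month > 12:
--         return 1
--     shifted = (cal_month - 2) % 12  # position of the calendar month in the Feb-first order
--     passed = sum(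
--         1
--         for bm, bd in MONTH_BOUNDARIES
--         if (bm - 2) % 12 < shifted or (bm == cal_month and cal_day >= bd)
--     )
--     return ((passed - 1) % 12) + 1
-- ===== Notes on version B (the rewrite author's own statement) =====
-- stated objective: alternative
-- what changed: B replaces A's find-the-matching-entry scan with early returns by a counting fold: it counts how many solar-term boundaries the date has already passed in Feb-first order and maps that count to the month number, after an explicit 1..12 range guard returning 1.
import Mathlib
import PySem

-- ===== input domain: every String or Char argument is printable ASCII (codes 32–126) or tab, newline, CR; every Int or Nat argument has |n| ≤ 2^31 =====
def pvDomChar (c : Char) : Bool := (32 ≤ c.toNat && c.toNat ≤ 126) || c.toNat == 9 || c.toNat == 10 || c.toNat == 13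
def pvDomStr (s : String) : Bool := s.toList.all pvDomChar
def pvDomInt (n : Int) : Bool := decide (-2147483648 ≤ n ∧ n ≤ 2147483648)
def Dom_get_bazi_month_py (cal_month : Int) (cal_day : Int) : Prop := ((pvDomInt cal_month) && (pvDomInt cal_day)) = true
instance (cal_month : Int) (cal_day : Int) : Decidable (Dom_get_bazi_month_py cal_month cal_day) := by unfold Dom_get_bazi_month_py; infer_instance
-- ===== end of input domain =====

-- B counts how many solar-term boundaries the date has passed instead of scanning for the matching table entry (objective: alternative).


-- ===== PORT A =====
-- MONTH_BOUNDARIES: module-level constant from Source A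
def pvMonthBoundaries : List (Int × Int) :=
  [(2, 4), (3, 6), (4, 5), (5, 6), (6, 6), (7, 7), (8, 7), (9, 8), (10, 8), (11, 7), (12, 7), (1, 6)]

-- the for-loop with early return; Python's `next_bm, next_bd = MONTH_BOUNDARIES[next_i]`
-- is dead code that never raises (next_i ∈ 0..11), kept as an unused binding.
def pvALoop (cal_month cal_day : Int) : List (Int × (Int × Int)) → Int
  | [] => 1
  | (i, (bm, bd)) :: rest =>
    let next_i := PySem.Int.mod (i + 1) 12
    let _next := PySem.List.pyGet? pvMonthBoundaries next_i
    if bm = cal_month ∧ cal_day ≥ bd then PySem.Int.mod i 12 + 1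
    else if bm = cal_month ∧ cal_day < bd then PySem.Int.mod (i - 1) 12 + 1
    else pvALoop cal_month cal_day rest

def get_bazi_month_py (cal_month : Int) (cal_day : Int) : Int :=
  pvALoop cal_month cal_day (PySem.List.enumerate pvMonthBoundaries)

-- ===== PORT B =====
-- Source B: guard the calendar-month range, then count passed boundaries with a fold (Python's sum over a generator)
def get_bazi_month_py_alt (cal_month : Int) (cal_day : Int) : Int :=
  if cal_month < 1 ∨ cal_month > 12 then 1
  else
    let shifted := PySem.Int.mod (cal_month - 2) 12
    let passed : Int := pvMonthBoundaries.foldl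
      (fun acc p =>
        if PySem.Int.mod (p.1 - 2) 12 < shifted ∨ (p.1 = cal_month ∧ cal_day ≥ p.2) then acc + 1 else acc)
      0
    PySem.Int.mod (passed - 1) 12 + 1

-- ===== PRECONDITION & SPEC =====
def Spec_get_bazi_month_py (cal_month : Int) (cal_day : Int) (out : Int) : Prop := out = get_bazi_month_py_alt cal_month cal_day
instance (cal_month : Int) (cal_day : Int) (out : Int) : Decidable (Spec_get_bazi_month_py cal_month cal_day out) := by unfold Spec_get_bazi_month_py; infer_instance

-- ===== CLAIM (what is proved, stated in full; the proofs are below) =====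
def Claim_equal_get_bazi_month_py : Prop := ∀ (cal_month : Int) (cal_day : Int), Dom_get_bazi_month_py cal_month cal_day → Spec_get_bazi_month_py cal_month cal_day (get_bazi_month_py cal_month cal_day)

-- ===== LEMMAS AND PROOFS =====

-- ===== VERDICT (by name: the statement is the Claim_ definition above) =====
theorem get_bazi_month_py_spec : Claim_equal_get_bazi_month_py := by
  intro cal_month cal_day _
  unfold Spec_get_bazi_month_py
  have hmod : ∀ a : Int, PySem.Int.mod a 12 = a % 12 := fun a => PySem.Int.mod_eq_emod_of_pos (by norm_num)
  by_cases h : 1 ≤ cal_month ∧ cal_month ≤ 12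
  · obtain ⟨h1, h2⟩ := h
    interval_cases cal_month <;>
      simp [get_bazi_month_py, get_bazi_month_py_alt, pvALoop, pvMonthBoundaries,
        PySem.List.enumerate, List.foldl, hmod] <;>
      split_ifs <;> omega
  · have hm : cal_month < 1 ∨ cal_month > 12 := by omega
    have hne : ∀ bm : Int, 1 ≤ bm → bm ≤ 12 → bm ≠ cal_month := by omega
    simp [get_bazi_month_py, get_bazi_month_py_alt, pvALoop, pvMonthBoundaries,
      PySem.List.enumerate, hm, hne 2 (by norm_num) (by norm_num), hne 3 (by norm_num) (by norm_num),
      hne 4 (by norm_num) (by norm_num), hne 5 (by norm_num) (by norm_num),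
      hne 6 (by norm_num) (by norm_num), hne 7 (by norm_num) (by norm_num),
      hne 8 (by norm_num) (by norm_num), hne 9 (by norm_num) (by norm_num),
      hne 10 (by norm_num) (by norm_num), hne 11 (by norm_num) (by norm_num),
      hne 12 (by norm_num) (by norm_num), hne 1 (by norm_num) (by norm_num)]
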